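-- pv_equiv track=rewrite | github.com/sdjangam/Python | mprun_demo.py | sum_of_lists
-- ===== SOURCE A (Python) =====
-- def sum_of_lists(N):
--     total = 0
--     for i in range(5):
--         L = [j ^ (j >> i) for j in range(N)]
--         total += sum(L)
--         abcd=range(0,10000)
--         del L # remove reference to L
--     return total
-- ===== SOURCE B (Python) =====
-- def _ones_below(m, b):
--     # number of j in [0, m) with bit b set
--     blk = 1 << b
--     return (m >> (b + 1)) * blk + max(0, m % (blk << 1) - blk)
--
--
-- def sum_of_lists(N):
--     if N <= 0:
--         return 0
--     total = 0
--     nbits = N.bit_length()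
--     for i in range(1, 5):
--         for b in range(nbits):
--             c = b + i
--             half = 1 << c
--             full = N >> (c + 1)
--             r = N % (half << 1)
--             if r <= half:
--                 diff = _ones_below(r, b)
--             else:
--                 diff = _ones_below(half, b) + (r - half) - _ones_below(r - half, b)
--             diff += full * half
--             total += (1 << b) * diff
--     return total
-- ===== Notes on version B (the rewrite author's own statement) =====
-- stated objective: faster
-- what changed: B replaces A's O(N) enumeration of j in range(N) (five list comprehensions) by per-bit counting: for each i in 1..4 and each bit b it counts in closed form how many j < N have bit b differing from bit b+i, so the total is computed in O(log^2 N) arithmetic operations with no loop over j.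
import Mathlib
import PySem

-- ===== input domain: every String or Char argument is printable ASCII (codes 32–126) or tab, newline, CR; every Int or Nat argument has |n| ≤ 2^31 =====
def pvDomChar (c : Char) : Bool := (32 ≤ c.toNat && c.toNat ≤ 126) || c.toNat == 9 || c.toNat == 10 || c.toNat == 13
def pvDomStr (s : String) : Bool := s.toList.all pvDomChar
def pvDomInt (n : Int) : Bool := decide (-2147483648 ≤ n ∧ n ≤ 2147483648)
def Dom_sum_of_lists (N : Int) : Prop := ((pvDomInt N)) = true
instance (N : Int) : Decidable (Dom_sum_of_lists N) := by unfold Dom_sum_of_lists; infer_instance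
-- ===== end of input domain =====

-- B replaces A's O(N) scan by per-bit counting with closed-form bit-pattern counts (O(log^2 N)); same return value.

-- ===== PORT A =====
-- Literal port of A: for i in range(5): L = [j ^ (j >> i) for j in range(N)]; total += sum(L).
-- (abcd = range(0,10000) and del L have no effect on the result; i is always ≥ 0, so j >> i is j >>> i.toNat.)
def sum_of_lists (N : Int) : Int :=
  (PySem.List.pyRange 0 5).foldl
    (fun total i =>
      let L : List Int := (PySem.List.pyRange 0 N).map (fun j => PySem.Int.bxor j (j >>> i.toNat))
      total + L.sum)
    0

-- ===== PORT B =====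
-- number of j in [0, m) with bit b set (m ≥ 0, b ≥ 0 at every call site)
def onesBelow (m b : Int) : Int :=
  let blk : Int := 1 <<< b.toNat
  (m >>> (b + 1).toNat) * blk + max (0 : Int) (PySem.Int.mod m (blk <<< (1:Nat)) - blk)

def sum_of_lists_alt (N : Int) : Int :=
  if N ≤ 0 then 0
  else
    let nbits := PySem.Int.bitLength N
    (PySem.List.pyRange 1 5).foldl
      (fun total i =>
        (PySem.List.pyRange 0 (nbits : Int)).foldl
          (fun total b =>
            let c := b + i
            let half : Int := 1 <<< c.toNat
            let full := N >>> (c + 1).toNat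
            let r := PySem.Int.mod N (half <<< (1:Nat))
            let diff :=
              (if r ≤ half then onesBelow r b
               else onesBelow half b + (r - half) - onesBelow (r - half) b) + full * half
            total + (1 <<< b.toNat) * diff)
          total)
      0

-- ===== PRECONDITION & SPEC =====
def Spec_sum_of_lists (N : Int) (out : Int) : Prop := out = sum_of_lists_alt N
instance (N : Int) (out : Int) : Decidable (Spec_sum_of_lists N out) := by unfold Spec_sum_of_lists; infer_instance

-- ===== CLAIM (what is proved, stated in full; the proofs are below) =====
def Claim_equal_sum_of_lists : Prop := ∀ (N : Int), Dom_sum_of_lists N → Spec_sum_of_lists N (sum_of_lists N)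

-- ===== LEMMAS AND PROOFS =====

-- Nat-level counterparts of B's closed forms
def onesN (n b : Nat) : Nat := n / 2 ^ (b+1) * 2 ^ b + (n % 2 ^ (b+1) - 2 ^ b)

def diffN (n b c : Nat) : Nat :=
  n / 2 ^ (c+1) * 2 ^ c +
  (if n % 2 ^ (c+1) ≤ 2 ^ c then onesN (n % 2 ^ (c+1)) b
   else onesN (2 ^ c) b + (n % 2 ^ (c+1) - 2 ^ c) - onesN (n % 2 ^ (c+1) - 2 ^ c) b)

theorem decomp (n b : Nat) : ∃ q r, n = r + 2 ^ b * 2 * q ∧ r < 2 ^ b * 2 := by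
  have h0 : 0 < 2 ^ b * 2 := by have := Nat.two_pow_pos b; omega
  exact ⟨n / (2 ^ b * 2), n % (2 ^ b * 2), by rw [Nat.add_comm, Nat.div_add_mod], Nat.mod_lt _ h0⟩

theorem testBit_div (b q r : Nat) (hr : r < 2 ^ b * 2) :
    (r + 2 ^ b * 2 * q).testBit b = decide (2 ^ b ≤ r) := by
  have h0 : 0 < 2 ^ b := Nat.two_pow_pos b
  rw [Nat.testBit_eq_decide_div_mod_eq]
  have e : (r + 2 ^ b * 2 * q) / 2 ^ b = r / 2 ^ b + 2 * q := by
    rw [show 2 ^ b * 2 * q = 2 ^ b * (2 * q) by ring, Nat.add_mul_div_left _ _ h0]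
  rw [e]
  rcases Nat.lt_or_ge r (2 ^ b) with h | h
  · rw [Nat.div_eq_of_lt h]; simp; omega
  · rw [show r / 2 ^ b = 1 from Nat.div_eq_of_lt_le (by omega) (by omega)]
    simp [h]

theorem onesN_rep (b q r : Nat) (hr : r < 2 ^ b * 2) :
    onesN (r + 2 ^ b * 2 * q) b = q * 2 ^ b + (r - 2 ^ b) := by
  have h0 : 0 < 2 ^ b := Nat.two_pow_pos b
  unfold onesN
  rw [pow_succ, Nat.add_mul_div_left _ _ (by omega), Nat.add_mul_mod_self_left,
    Nat.div_eq_of_lt hr, Nat.mod_eq_of_lt hr, Nat.zero_add]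

theorem onesN_le (n b : Nat) : onesN n b ≤ n := by
  obtain ⟨q, r, rfl, hr⟩ := decomp n b
  rw [onesN_rep b q r hr]
  have : q * 2 ^ b + q * 2 ^ b = 2 ^ b * 2 * q := by ring
  omega

theorem onesN_succ (n b : Nat) :
    onesN (n+1) b = onesN n b + (if n.testBit b then 1 else 0) := by
  have h0 : 0 < 2 ^ b := Nat.two_pow_pos b
  obtain ⟨q, r, rfl, hr⟩ := decomp n b
  rw [testBit_div b q r hr, onesN_rep b q r hr]
  rcases Nat.lt_or_ge (r+1) (2 ^ b * 2) with h | h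
  · rw [show r + 2 ^ b * 2 * q + 1 = (r+1) + 2 ^ b * 2 * q by ring, onesN_rep b q (r+1) h]
    by_cases h2 : 2 ^ b ≤ r <;> simp [h2] <;> omega
  · rw [show r + 2 ^ b * 2 * q + 1 = 0 + 2 ^ b * 2 * (q+1) by
        have e2 : 2 ^ b * 2 * (q+1) = 2 ^ b * 2 * q + 2 ^ b * 2 := by ring
        omega,
      onesN_rep b (q+1) 0 (by omega)]
    have : 2 ^ b ≤ r := by omega
    simp only [this, decide_true, if_pos]
    have e1 : (q+1) * 2 ^ b = q * 2 ^ b + 2 ^ b := by ring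
    omega

theorem diffN_rep (b c q r : Nat) (hr : r < 2 ^ c * 2) :
    diffN (r + 2 ^ c * 2 * q) b c =
      q * 2 ^ c +
      (if r ≤ 2 ^ c then onesN r b
       else onesN (2 ^ c) b + (r - 2 ^ c) - onesN (r - 2 ^ c) b) := by
  have h0 : 0 < 2 ^ c := Nat.two_pow_pos c
  unfold diffN
  rw [pow_succ, Nat.add_mul_div_left _ _ (by omega), Nat.add_mul_mod_self_left,
    Nat.div_eq_of_lt hr, Nat.mod_eq_of_lt hr, Nat.zero_add]

theorem testBit_congr (b x y : Nat) (h : x % 2 ^ (b+1) = y % 2 ^ (b+1)) :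
    x.testBit b = y.testBit b := by
  have hx := Nat.testBit_mod_two_pow x (b+1) b
  have hy := Nat.testBit_mod_two_pow y (b+1) b
  simp only [Nat.lt_succ_self, decide_true, Bool.true_and] at hx hy
  rw [← hx, h, hy]

theorem mod_add_mul_of_dvd (r m k q : Nat) (h : k ∣ m) : (r + m * q) % k = r % k := by
  obtain ⟨d, rfl⟩ := h
  rw [show r + k * d * q = r + k * (d * q) by ring, Nat.add_mul_mod_self_left]

theorem onesN_zero (b : Nat) : onesN 0 b = 0 := by simp [onesN]

theorem onesN_one (b : Nat) : onesN 1 b = 0 := by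
  have := onesN_succ 0 b
  simp [onesN_zero, Nat.zero_testBit] at this
  exact this

theorem diffN_succ (n b c : Nat) (hbc : b < c) :
    diffN (n+1) b c = diffN n b c + (if n.testBit b ≠ n.testBit c then 1 else 0) := by
  have h0 : 0 < 2 ^ c := Nat.two_pow_pos c
  have h2c : 2 ≤ 2 ^ c := by
    have := Nat.pow_le_pow_right (show 1 ≤ 2 by norm_num) (show 1 ≤ c by omega)
    simpa using this
  obtain ⟨q, r, rfl, hr⟩ := decomp n c
  have hc : (r + 2 ^ c * 2 * q).testBit c = decide (2 ^ c ≤ r) := testBit_div c q r hr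
  have hbr : (r + 2 ^ c * 2 * q).testBit b = r.testBit b :=
    testBit_congr b _ _
      (mod_add_mul_of_dvd r _ _ q (dvd_mul_of_dvd_left (pow_dvd_pow 2 (by omega)) 2))
  rw [hc, hbr, diffN_rep b c q r hr]
  rcases Nat.lt_or_ge (r+1) (2 ^ c * 2) with h | h
  · rw [show r + 2 ^ c * 2 * q + 1 = (r+1) + 2 ^ c * 2 * q by ring, diffN_rep b c q (r+1) h]
    by_cases h1 : r < 2 ^ c
    · rw [if_pos (show r+1 ≤ 2 ^ c by omega), if_pos (show r ≤ 2 ^ c by omega),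
        onesN_succ r b, show decide (2 ^ c ≤ r) = false by simp; omega]
      cases hrb : r.testBit b <;> simp <;> omega
    · push_neg at h1
      have hbr2 : r.testBit b = (r - 2 ^ c).testBit b := by
        have e : r = (r - 2 ^ c) + 2 ^ c * 1 := by omega
        apply testBit_congr
        conv_lhs => rw [e]
        exact mod_add_mul_of_dvd _ _ _ 1 (pow_dvd_pow 2 (by omega))
      have hdec : decide (2 ^ c ≤ r) = true := by simp; omega
      by_cases h2 : r = 2 ^ c
      · subst h2
        rw [if_neg (show ¬ (2 ^ c + 1 ≤ 2 ^ c) by omega), if_pos (le_refl _),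
          Nat.add_sub_cancel_left, onesN_one, hdec,
          show (2 ^ c : Nat).testBit b = false by
            rw [Nat.testBit_two_pow]; simp; omega]
        simp
        omega
      · have h3 : 2 ^ c < r := by omega
        rw [if_neg (show ¬ (r+1 ≤ 2 ^ c) by omega), if_neg (show ¬ (r ≤ 2 ^ c) by omega),
          hdec, hbr2, show r + 1 - 2 ^ c = (r - 2 ^ c) + 1 by omega,
          onesN_succ (r - 2 ^ c) b]
        have hle1 := onesN_le (r - 2 ^ c) b
        have hle2 := onesN_le (2 ^ c) b
        cases hrb : (r - 2 ^ c).testBit b <;> simp <;> omega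
  · have hre : r = 2 ^ c * 2 - 1 := by omega
    rw [show r + 2 ^ c * 2 * q + 1 = 0 + 2 ^ c * 2 * (q+1) by
        have e2 : 2 ^ c * 2 * (q+1) = 2 ^ c * 2 * q + 2 ^ c * 2 := by ring
        omega,
      diffN_rep b c (q+1) 0 (by omega), if_pos (Nat.zero_le _), onesN_zero,
      if_neg (show ¬ (r ≤ 2 ^ c) by omega)]
    have hrb : r.testBit b = true := by
      rw [hre, show 2 ^ c * 2 - 1 = 2 ^ (c+1) - 1 by rw [pow_succ],
        Nat.testBit_two_pow_sub_one]
      simp; omega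
    have hdec : decide (2 ^ c ≤ r) = true := by simp; omega
    rw [hrb, hdec]
    have hs : onesN (2 ^ c) b = onesN (2 ^ c - 1) b + 1 := by
      have h4 := onesN_succ (2 ^ c - 1) b
      rw [show 2 ^ c - 1 + 1 = 2 ^ c by omega] at h4
      rw [h4, Nat.testBit_two_pow_sub_one]
      simp [hbc]
    have e1 : (q+1) * 2 ^ c = q * 2 ^ c + 2 ^ c := by ring
    have hle2 := onesN_le (2 ^ c - 1) b
    have hr2 : r - 2 ^ c = 2 ^ c - 1 := by omega
    rw [hr2]
    simp
    omega

theorem diffN_count (n b c : Nat) (hbc : b < c) :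
    diffN n b c = ∑ j ∈ Finset.range n, (if j.testBit b ≠ j.testBit c then 1 else 0) := by
  induction n with
  | zero => simp [diffN, onesN]
  | succ n ih => rw [Finset.sum_range_succ, diffN_succ n b c hbc, ih]

theorem sum_bits (K : Nat) : ∀ x : Nat, x < 2 ^ K →
    (∑ b ∈ Finset.range K, 2 ^ b * (if x.testBit b then 1 else 0)) = x := by
  induction K with
  | zero => intro x hx; interval_cases x; simp
  | succ K ih =>
    intro x hx
    rw [Finset.sum_range_succ']
    have e : ∀ b, 2 ^ (b+1) * (if x.testBit (b+1) then 1 else 0)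
        = 2 * (2 ^ b * (if (x/2).testBit b then 1 else 0)) := by
      intro b
      rw [show x.testBit (b+1) = (x/2).testBit b from Nat.testBit_succ x b]
      ring
    rw [Finset.sum_congr rfl (fun b _ => e b), ← Finset.mul_sum,
      ih (x/2) (by rw [pow_succ] at hx; omega)]
    rcases Nat.mod_two_eq_zero_or_one x with h | h <;>
      simp [Nat.testBit_zero, h] <;> omega

theorem sumXor_eq (n K i : Nat) (hn : n ≤ 2 ^ K) (hi : 1 ≤ i) :
    (∑ j ∈ Finset.range n, (j ^^^ (j >>> i))) =
      ∑ b ∈ Finset.range K, 2 ^ b * diffN n b (b+i) := by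
  have step : ∀ j ∈ Finset.range n, (j ^^^ (j >>> i)) =
      ∑ b ∈ Finset.range K, 2 ^ b * (if j.testBit b ≠ j.testBit (b+i) then 1 else 0) := by
    intro j hj
    simp only [Finset.mem_range] at hj
    have hjK : j < 2 ^ K := lt_of_lt_of_le hj hn
    have hx : (j ^^^ (j >>> i)) < 2 ^ K :=
      Nat.xor_lt_two_pow hjK (lt_of_le_of_lt (Nat.shiftRight_le _ _) hjK)
    rw [← sum_bits K _ hx]
    refine Finset.sum_congr rfl fun b _ => ?_
    congr 1
    rw [Nat.testBit_xor, Nat.testBit_shiftRight, Nat.add_comm i b]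
    cases j.testBit b <;> cases j.testBit (b+i) <;> simp
  rw [Finset.sum_congr rfl step, Finset.sum_comm]
  refine Finset.sum_congr rfl fun b _ => ?_
  rw [diffN_count n b (b+i) (by omega), Finset.mul_sum]

theorem shl_one_cast (x : Nat) : ((x : Nat) : Int) <<< (1:Nat) = ((x * 2 : Nat) : Int) := by
  rw [Int.shiftLeft_eq]; push_cast; ring

theorem onesBelow_natCast (m b : Nat) :
    onesBelow (m : Int) (b : Int) = ((onesN m b : Nat) : Int) := by
  dsimp only [onesBelow, onesN]
  rw [show ((b : Int) + 1).toNat = b + 1 by omega, Int.toNat_natCast,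
    show (1 <<< b : Nat) = 2 ^ b from Nat.one_shiftLeft b,
    shl_one_cast, show (2:Nat) ^ b * 2 = 2 ^ (b+1) by rw [pow_succ],
    PySem.Int.mod_natCast,
    show ((m : Int) >>> (b+1)) = ((m >>> (b+1) : Nat) : Int) by simp,
    Nat.shiftRight_eq_div_pow]
  have hmax : max (0:Int) (((m % 2 ^ (b+1) : Nat) : Int) - (((2:Nat) ^ b : Nat) : Int))
      = ((m % 2 ^ (b+1) - 2 ^ b : Nat) : Int) := by omega
  rw [hmax]
  push_cast
  ring

theorem list_sum_range (n : Nat) (g : Nat → Int) :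
    ((List.range n).map g).sum = ∑ j ∈ Finset.range n, g j := rfl

theorem pyRangeSum (K : Nat) (g : Int → Int) (gN : Nat → Nat)
    (h : ∀ k, k < K → g (k : Int) = ((gN k : Nat) : Int)) :
    ((PySem.List.pyRange 0 (K : Int)).map g).sum = ((∑ b ∈ Finset.range K, gN b : Nat) : Int) := by
  rw [PySem.List.pyRange_zero_natCast, List.map_map, list_sum_range, Nat.cast_sum]
  exact Finset.sum_congr rfl fun b hb => h b (Finset.mem_range.mp hb)

theorem shr_cast' (a e : Nat) : ((a : Int) >>> ((e : Nat) : Int)) = ((a >>> e : Nat) : Int) := by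
  simp

theorem A_term (n i : Nat) (iI : Int) (hi : iI.toNat = i) :
    ((PySem.List.pyRange 0 (n : Int)).map
      (fun j => PySem.Int.bxor j (j >>> ((iI.toNat : Nat) : Int)))).sum =
      ((∑ j ∈ Finset.range n, (j ^^^ (j >>> i)) : Nat) : Int) := by
  subst hi
  apply pyRangeSum
  intro k _
  rw [shr_cast' k iI.toNat, PySem.Int.bxor_natCast]

theorem shr_cast (a e : Nat) : ((a : Int) >>> ((e : Nat) : Int)) = ((a / 2 ^ e : Nat) : Int) := by
  simp [Nat.shiftRight_eq_div_pow]

theorem B_sum (n K iN : Nat) (i : Int) (hi : i = (iN : Int)) (h1 : 1 ≤ iN) :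
    ((PySem.List.pyRange 0 (K : Int)).map
      (fun b =>
        ((1 <<< b.toNat : Nat) : Int) *
          ((if PySem.Int.mod ((n : Nat) : Int) (((1 <<< (b + i).toNat : Nat) : Int) <<< (1:Nat)) ≤ ((1 <<< (b + i).toNat : Nat) : Int) then
              onesBelow (PySem.Int.mod ((n : Nat) : Int) (((1 <<< (b + i).toNat : Nat) : Int) <<< (1:Nat))) b
            else
              onesBelow ((1 <<< (b + i).toNat : Nat) : Int) b +
                  (PySem.Int.mod ((n : Nat) : Int) (((1 <<< (b + i).toNat : Nat) : Int) <<< (1:Nat)) - ((1 <<< (b + i).toNat : Nat) : Int)) -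
                onesBelow (PySem.Int.mod ((n : Nat) : Int) (((1 <<< (b + i).toNat : Nat) : Int) <<< (1:Nat)) - ((1 <<< (b + i).toNat : Nat) : Int)) b) +
            ((n : Nat) : Int) >>> ((((b + i + 1).toNat : Nat) : Int)) * ((1 <<< (b + i).toNat : Nat) : Int)))).sum
      = ((∑ k ∈ Finset.range K, 2 ^ k * diffN n k (k + iN) : Nat) : Int) := by
  subst hi
  apply pyRangeSum
  intro k hk
  dsimp only []
  rw [show ((k : Int) + (iN : Int)).toNat = k + iN by omega,
    show ((k : Int) + (iN : Int) + 1).toNat = k + iN + 1 by omega,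
    Int.toNat_natCast,
    show (1 <<< k : Nat) = 2 ^ k from Nat.one_shiftLeft k,
    show (1 <<< (k + iN) : Nat) = 2 ^ (k + iN) from Nat.one_shiftLeft (k + iN),
    shl_one_cast, show (2:Nat) ^ (k + iN) * 2 = 2 ^ (k + iN + 1) by rw [pow_succ],
    PySem.Int.mod_natCast,
    shr_cast n (k + iN + 1)]
  unfold diffN
  by_cases hc : n % 2 ^ (k + iN + 1) ≤ 2 ^ (k + iN)
  · rw [if_pos (by exact_mod_cast hc), if_pos hc, onesBelow_natCast]
    push_cast
    ring
  · rw [if_neg (by exact_mod_cast hc), if_neg hc]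
    push_neg at hc
    rw [show ((n % 2 ^ (k + iN + 1) : Nat) : Int) - (((2:Nat) ^ (k + iN) : Nat) : Int)
        = ((n % 2 ^ (k + iN + 1) - 2 ^ (k + iN) : Nat) : Int) by omega,
      onesBelow_natCast, onesBelow_natCast]
    have hle1 := onesN_le (n % 2 ^ (k + iN + 1) - 2 ^ (k + iN)) k
    have hcast : ((onesN (2 ^ (k + iN)) k : Nat) : Int) +
        ((n % 2 ^ (k + iN + 1) - 2 ^ (k + iN) : Nat) : Int) -
        ((onesN (n % 2 ^ (k + iN + 1) - 2 ^ (k + iN)) k : Nat) : Int) =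
        ((onesN (2 ^ (k + iN)) k + (n % 2 ^ (k + iN + 1) - 2 ^ (k + iN))
          - onesN (n % 2 ^ (k + iN + 1) - 2 ^ (k + iN)) k : Nat) : Int) := by omega
    rw [hcast]
    push_cast
    ring

-- ===== VERDICT (by name: the statement is the Claim_ definition above) =====
theorem sum_of_lists_spec : Claim_equal_sum_of_lists := by
  unfold Claim_equal_sum_of_lists
  intro N _
  unfold Spec_sum_of_lists
  by_cases hN : N ≤ 0
  · dsimp only [sum_of_lists, sum_of_lists_alt]
    rw [if_pos hN, show PySem.List.pyRange 0 5 = [0, 1, 2, 3, 4] from by decide,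
      PySem.List.pyRange_one_eq_nil hN]
    simp [List.foldl]
  · obtain ⟨n, rfl⟩ : ∃ n : Nat, N = (n : Int) := ⟨N.toNat, by omega⟩
    have hnK : n ≤ 2 ^ PySem.Int.bitLength (n : Int) := by
      have := PySem.Int.lt_two_pow_bitLength (n : Int)
      simpa using this.le
    dsimp only [sum_of_lists, sum_of_lists_alt]
    rw [if_neg hN, show PySem.List.pyRange 0 5 = [0, 1, 2, 3, 4] from by decide,
      show PySem.List.pyRange 1 5 = [1, 2, 3, 4] from by decide]
    dsimp only [List.foldl]
    rw [PySem.List.foldl_add, PySem.List.foldl_add, PySem.List.foldl_add, PySem.List.foldl_add]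
    rw [B_sum n _ 4 4 (by norm_num) (by norm_num), B_sum n _ 3 3 (by norm_num) (by norm_num),
      B_sum n _ 2 2 (by norm_num) (by norm_num), B_sum n _ 1 1 (by norm_num) (by norm_num)]
    rw [A_term n 0 0 rfl, A_term n 1 1 rfl, A_term n 2 2 rfl, A_term n 3 3 rfl, A_term n 4 4 rfl]
    rw [show (∑ j ∈ Finset.range n, (j ^^^ (j >>> 0))) = 0 from
        Finset.sum_eq_zero (fun j _ => by simp),
      sumXor_eq n _ 1 hnK (by norm_num), sumXor_eq n _ 2 hnK (by norm_num),
      sumXor_eq n _ 3 hnK (by norm_num), sumXor_eq n _ 4 hnK (by norm_num)]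
    push_cast
    ring
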